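-- pv_equiv track=rewrite | github.com/YuvaNithesh/MY_LEETCODE | 1494-parallel-courses-ii/1494-parallel-courses-ii.py | minNumberOfSemesters
-- ===== SOURCE A (Python) =====
-- from collections import deque
--
-- def minNumberOfSemesters(n, relations, k):
--     # Step 1: Build prerequisite bitmask
--     prereq = [0] * n
--     for u, v in relations:
--         prereq[v - 1] |= (1 << (u - 1))
--
--     # Step 2: BFS
--     queue = deque([(0, 0)])  # (mask, semesters)
--     visited = set([0])
--
--     while queue:
--         mask, steps = queue.popleft()
--
--         # If all courses taken
--         if mask == (1 << n) - 1:
--             return steps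
--
--         # Step 3: Find available courses
--         can_take = 0
--         for i in range(n):
--             if not (mask & (1 << i)) and (prereq[i] & mask) == prereq[i]:
--                 can_take |= (1 << i)
--
--         # Step 4: Generate subsets of size ≤ k
--         subset = can_take
--         valid_subsets = []
--
--         while subset:
--             if bin(subset).count('1') <= k:
--                 valid_subsets.append(subset)
--             subset = (subset - 1) & can_take
--
--         # Optimization: if available courses ≤ k, take all
--         if bin(can_take).count('1') <= k:
--             valid_subsets = [can_take]
--
--         # Step 5: BFS transition
--         for sub in valid_subsets:
--             new_mask = mask | sub
--             if new_mask not in visited: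
--                 visited.add(new_mask)
--                 queue.append((new_mask, steps + 1))
--
--     return -1
-- ===== SOURCE B (Python) =====
-- def minNumberOfSemesters(n, relations, k):
--     # Build prerequisite bitmasks (same representation as any bitmask solution).
--     prereq = [0] * n
--     for u, v in relations:
--         prereq[v - 1] |= (1 << (u - 1))
--
--     full = (1 << n) - 1
--     # Bottom-up DP over course masks in increasing numeric order.
--     # dp[mask] = fewest semesters to reach exactly this set of taken courses.
--     dp = [None] * (full + 1)
--     dp[0] = 0
--     for mask in range(full + 1):
--         d = dp[mask]
--         if d is None:
--             continue
--         can_take = 0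
--         for i in range(n):
--             if not (mask & (1 << i)) and (prereq[i] & mask) == prereq[i]:
--                 can_take |= (1 << i)
--         for sub in _semester_choices(can_take, k):
--             nm = mask | sub
--             if dp[nm] is None or d + 1 < dp[nm]:
--                 dp[nm] = d + 1
--     return -1 if dp[full] is None else dp[full]
--
--
-- def _semester_choices(can_take, k):
--     # All sub-masks of can_take with at most k bits; when everything
--     # available fits in one semester, taking it all is optimal.
--     res = []
--     sub = can_take
--     while sub:
--         if bin(sub).count('1') <= k:
--             res.append(sub)
--         sub = (sub - 1) & can_take
--     if bin(can_take).count('1') <= k: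
--         res = [can_take]
--     return res
-- ===== Notes on version B (the rewrite author's own statement) =====
-- stated objective: alternative
-- what changed: Replaces A's first-visit BFS (FIFO queue + visited set over reachable course masks) by a bottom-up dynamic program dp[mask] over all 2^n masks processed in increasing numeric order, relaxing dp[mask|sub] through the same per-semester choices and reading dp[full] at the end.
import Mathlib
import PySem

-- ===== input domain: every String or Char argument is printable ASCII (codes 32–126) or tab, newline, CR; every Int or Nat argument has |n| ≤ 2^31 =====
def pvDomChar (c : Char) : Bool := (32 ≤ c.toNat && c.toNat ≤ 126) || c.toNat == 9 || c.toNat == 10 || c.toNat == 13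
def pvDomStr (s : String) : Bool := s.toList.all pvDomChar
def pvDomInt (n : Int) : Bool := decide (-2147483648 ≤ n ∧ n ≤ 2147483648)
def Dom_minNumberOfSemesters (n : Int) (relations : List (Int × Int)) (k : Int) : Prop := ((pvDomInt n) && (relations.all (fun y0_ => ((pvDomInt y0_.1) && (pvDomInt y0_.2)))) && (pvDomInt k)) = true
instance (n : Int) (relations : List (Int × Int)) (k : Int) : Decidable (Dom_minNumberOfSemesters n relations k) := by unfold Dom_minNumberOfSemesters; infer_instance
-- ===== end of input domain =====

-- B replaces A's first-visit BFS over course bitmasks by a bottom-up DP over all masks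
-- in increasing numeric order (objective: alternative algorithm, similar cost).
-- All masks/steps are nonnegative Python ints on the admitted inputs, so they are
-- modelled as Nat below; the Int-indexed list accesses keep Python's negative-index rule.

-- ===== PORT A =====
-- shared by both ports (both Pythons build prereq / can_take / the subset list identically)

-- Python `pr[idx] |= bit` with Python's negative-index rule; an out-of-range index is an
-- IndexError in Python (excluded by Pre_) and leaves the list unchanged here (pySetD).
def pvOrAt (pr : List Nat) (idx : Int) (bit : Nat) : List Nat :=
  PySem.List.pySetD pr idx ((PySem.List.pyGetD pr idx 0) ||| bit)

-- prereq = [0]*n; for u, v in relations: prereq[v-1] |= 1 << (u-1)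
-- (1 << (u-1): Python raises ValueError for u < 1, excluded by Pre_; (u-1).toNat is exact for u ≥ 1)
def pvPrereq (n : Int) (relations : List (Int × Int)) : List Nat :=
  relations.foldl (fun pr uv => pvOrAt pr (uv.2 - 1) (1 <<< (uv.1 - 1).toNat))
    (List.replicate n.toNat 0)

-- can_take = 0; for i in range(n): if not (mask & (1 << i)) and (prereq[i] & mask) == prereq[i] ...
def pvCanTake (N : Nat) (pr : List Nat) (mask : Nat) : Nat :=
  (List.range N).foldl
    (fun ct i =>
      if mask &&& (1 <<< i) = 0 ∧ (pr.getD i 0) &&& mask = pr.getD i 0 then ct ||| (1 <<< i)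
      else ct) 0

-- while subset: if bin(subset).count('1') <= k: append; subset = (subset-1) & can_take
-- (bin(x).count('1') of a nonnegative int is PySem.Int.bitCount)
def pvSubsLoop (canT : Nat) (k : Int) (sub : Nat) (acc : List Nat) : List Nat :=
  if sub = 0 then acc
  else pvSubsLoop canT k ((sub - 1) &&& canT)
        (if (PySem.Int.bitCount (sub : Int) : Int) ≤ k then acc ++ [sub] else acc)
termination_by sub
decreasing_by
  have h1 : (sub - 1) &&& canT ≤ sub - 1 := Nat.and_le_left
  omega

-- valid_subsets (incl. A's "take all available if they fit" override, present in both Pythons)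
def pvChoices (canT : Nat) (k : Int) : List Nat :=
  let vs := pvSubsLoop canT k canT []
  if (PySem.Int.bitCount (canT : Int) : Int) ≤ k then [canT] else vs

-- A's while-queue loop; fuel only makes the recursion structural (the Python loop performs
-- at most 2^n pops, proved below, so the fuel passed by `minNumberOfSemesters` never runs out).
def bfsLoopA (N : Nat) (pr : List Nat) (k : Int) :
    Nat → List (Nat × Nat) → PySem.Set Nat → Int
  | 0, _, _ => -1
  | _ + 1, [], _ => -1
  | fuel + 1, (mask, steps) :: rest, visited =>
    if mask = 2 ^ N - 1 then (steps : Int)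
    else
      let st := (pvChoices (pvCanTake N pr mask) k).foldl
        (fun (st : List (Nat × Nat) × PySem.Set Nat) sub =>
          let nm := mask ||| sub
          if PySem.Set.contains st.2 nm then st
          else (st.1 ++ [(nm, steps + 1)], PySem.Set.add st.2 nm))
        (rest, visited)
      bfsLoopA N pr k fuel st.1 st.2

def minNumberOfSemesters (n : Int) (relations : List (Int × Int)) (k : Int) : Int :=
  bfsLoopA n.toNat (pvPrereq n relations) k (2 ^ (n.toNat + 1) + 1)
    [(0, 0)] (PySem.Set.ofList [0])

-- ===== PORT B =====
-- dp[nm] = dp[mask]+1 if dp[nm] is None or dp[mask]+1 < dp[nm]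
def dpRelax (d mask : Nat) (dp : List (Option Nat)) (sub : Nat) : List (Option Nat) :=
  let nm := mask ||| sub
  match dp.getD nm none with
  | none => dp.set nm (some (d + 1))
  | some x => if d + 1 < x then dp.set nm (some (d + 1)) else dp

-- one iteration of `for mask in range(full+1)`
def dpStep (N : Nat) (pr : List Nat) (k : Int) (dp : List (Option Nat)) (mask : Nat) :
    List (Option Nat) :=
  match dp.getD mask none with
  | none => dp
  | some d => (pvChoices (pvCanTake N pr mask) k).foldl (dpRelax d mask) dp

def minNumberOfSemesters_alt (n : Int) (relations : List (Int × Int)) (k : Int) : Int :=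
  let N := n.toNat
  let pr := pvPrereq n relations
  let full := 2 ^ N - 1
  let dp := (List.range (full + 1)).foldl (dpStep N pr k)
      ((List.replicate (full + 1) (none : Option Nat)).set 0 (some 0))
  match dp.getD full none with
  | none => -1
  | some d => (d : Int)

-- ===== PRECONDITION & SPEC =====
-- Exactly the inputs on which the Python A returns normally: n < 0 raises ValueError (1 << n),
-- u < 1 raises ValueError (1 << (u-1)), and v outside [1-n, n] raises IndexError (prereq[v-1]).
def Pre_minNumberOfSemesters (n : Int) (relations : List (Int × Int)) (k : Int) : Prop :=
  0 ≤ n ∧ ∀ uv ∈ relations, 1 ≤ uv.1 ∧ 1 - n ≤ uv.2 ∧ uv.2 ≤ n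

instance (n : Int) (relations : List (Int × Int)) (k : Int) :
    Decidable (Pre_minNumberOfSemesters n relations k) := by
  unfold Pre_minNumberOfSemesters; infer_instance

def pvWitness_minNumberOfSemesters : Int × (List (Int × Int)) × Int := (3, [(1, 3), (2, 3)], 2)

def Spec_minNumberOfSemesters (n : Int) (relations : List (Int × Int)) (k : Int) (out : Int) :
    Prop := out = minNumberOfSemesters_alt n relations k

instance (n : Int) (relations : List (Int × Int)) (k : Int) (out : Int) :
    Decidable (Spec_minNumberOfSemesters n relations k out) := by
  unfold Spec_minNumberOfSemesters; infer_instance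

-- ===== CLAIM (what is proved, stated in full; the proofs are below) =====
def Claim_equal_minNumberOfSemesters : Prop :=
  ∀ (n : Int) (relations : List (Int × Int)) (k : Int),
    Dom_minNumberOfSemesters n relations k → Pre_minNumberOfSemesters n relations k →
      Spec_minNumberOfSemesters n relations k (minNumberOfSemesters n relations k)

-- ===== LEMMAS AND PROOFS =====

-- The implicit graph both programs search: from mask m one semester leads to m ||| sub.
def pvEdges (N : Nat) (pr : List Nat) (k : Int) (m : Nat) : List Nat :=
  (pvChoices (pvCanTake N pr m) k).map (m ||| ·)

-- BFS level of m = least number of semesters reaching m, by strong recursion on m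
-- (every proper predecessor of m is numerically smaller).
def pvDist (N : Nat) (pr : List Nat) (k : Int) (m : Nat) : Option Nat :=
  if m = 0 then some 0 else
    ((List.range m).attach.filterMap (fun p =>
      if m ∈ pvEdges N pr k p.1 then (pvDist N pr k p.1).map (· + 1) else none)).min?
termination_by m
decreasing_by exact List.mem_range.mp p.2

-- Predecessor minimum over processed masks < M (the DP's partial relaxation value).
def pvPMin (N : Nat) (pr : List Nat) (k : Int) (M m : Nat) : Option Nat :=
  if m = 0 then some 0 else
    ((List.range M).filterMap (fun p =>
      if m ∈ pvEdges N pr k p then (pvDist N pr k p).map (· + 1) else none)).min?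

theorem pvDist_eq_pvPMin (N : Nat) (pr : List Nat) (k : Int) (m : Nat) :
    pvDist N pr k m = pvPMin N pr k m m := by
  rw [pvDist, pvPMin]
  rcases eq_or_ne m 0 with h | h
  · simp [h]
  · rw [if_neg h, if_neg h]
    congr 1
    conv_rhs => rw [← List.attach_map_subtype_val (List.range m)]
    rw [List.filterMap_map]
    rfl

-- ---------- bitmask facts ----------

theorem pvCanTake_spec (N : Nat) (pr : List Nat) (m : Nat) :
    pvCanTake N pr m &&& m = 0 ∧ pvCanTake N pr m < 2 ^ N := by
  have key : ∀ (l : List Nat), (∀ i ∈ l, i < N) → ∀ acc : Nat, acc &&& m = 0 → acc < 2 ^ N →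
      (l.foldl (fun ct i =>
        if m &&& (1 <<< i) = 0 ∧ (pr.getD i 0) &&& m = pr.getD i 0 then ct ||| (1 <<< i)
        else ct) acc) &&& m = 0 ∧
      (l.foldl (fun ct i =>
        if m &&& (1 <<< i) = 0 ∧ (pr.getD i 0) &&& m = pr.getD i 0 then ct ||| (1 <<< i)
        else ct) acc) < 2 ^ N := by
    intro l
    induction l with
    | nil => intro _ acc h0 hlt; exact ⟨h0, hlt⟩
    | cons i t ih =>
      intro hl acc h0 hlt
      simp only [List.foldl_cons]
      by_cases hc : m &&& (1 <<< i) = 0 ∧ (pr.getD i 0) &&& m = pr.getD i 0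
      · rw [if_pos hc]
        refine ih (fun j hj => hl j (List.mem_cons_of_mem _ hj)) _ ?_ ?_
        · rw [Nat.and_or_distrib_right, h0, Nat.and_comm (1 <<< i) m, hc.1, Nat.or_self]
        · have hi : (1 : Nat) <<< i < 2 ^ N := by
            rw [Nat.shiftLeft_eq, one_mul]
            exact Nat.pow_lt_pow_right one_lt_two (hl i List.mem_cons_self)
          exact Nat.or_lt_two_pow hlt hi
      · rw [if_neg hc]
        exact ih (fun j hj => hl j (List.mem_cons_of_mem _ hj)) acc h0 hlt
  exact key (List.range N) (fun i hi => List.mem_range.mp hi) 0 (by simp) (Nat.two_pow_pos N)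

theorem pvSubsLoop_mem (canT : Nat) (k : Int) :
    ∀ (s : Nat) (acc : List Nat), s &&& canT = s → ∀ x ∈ pvSubsLoop canT k s acc,
      x ∈ acc ∨ x &&& canT = x := by
  intro s
  induction s using Nat.strong_induction_on with
  | _ s ih =>
    intro acc hs x hx
    rw [pvSubsLoop] at hx
    by_cases h0 : s = 0
    · rw [if_pos h0] at hx; exact Or.inl hx
    · rw [if_neg h0] at hx
      have hlt : (s - 1) &&& canT < s := lt_of_le_of_lt Nat.and_le_left (by omega)
      have hsub : ((s - 1) &&& canT) &&& canT = (s - 1) &&& canT := by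
        rw [Nat.and_assoc, Nat.and_self]
      rcases ih _ hlt _ hsub x hx with h | h
      · by_cases hk : (PySem.Int.bitCount (s : Int) : Int) ≤ k
        · rw [if_pos hk] at h
          rcases List.mem_append.mp h with h | h
          · exact Or.inl h
          · simp only [List.mem_singleton] at h
            subst h; exact Or.inr hs
        · rw [if_neg hk] at h; exact Or.inl h
      · exact Or.inr h

theorem pvChoices_mem (canT : Nat) (k : Int) :
    ∀ sub ∈ pvChoices canT k, sub &&& canT = sub := by
  intro sub h
  unfold pvChoices at h
  by_cases hk : (PySem.Int.bitCount (canT : Int) : Int) ≤ k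
  · rw [if_pos hk] at h
    simp only [List.mem_singleton] at h
    subst h; exact Nat.and_self _
  · rw [if_neg hk] at h
    rcases pvSubsLoop_mem canT k canT [] (Nat.and_self canT) sub h with h | h
    · exact absurd h (List.not_mem_nil)
    · exact h

theorem pv_or_gt_of_ne_zero {s m : Nat} (hs : s ≠ 0) (hdisj : s &&& m = 0) :
    m < m ||| s := by
  rcases Nat.exists_testBit_of_ne_zero hs with ⟨j, hj⟩
  have hmj : m.testBit j = false := by
    have h := congrArg (fun x => Nat.testBit x j) hdisj
    simp only [Nat.testBit_and, Nat.zero_testBit, hj, Bool.true_and] at h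
    exact h
  apply lt_of_le_of_ne Nat.left_le_or
  intro he
  have h2 : (m ||| s).testBit j = true := by
    simp [Nat.testBit_or, hj]
  rw [← he, hmj] at h2
  exact Bool.false_ne_true h2

theorem pvEdges_ge {N : Nat} {pr : List Nat} {k : Int} {m m' : Nat}
    (h : m' ∈ pvEdges N pr k m) : m ≤ m' := by
  rcases List.mem_map.mp h with ⟨sub, _, rfl⟩
  exact Nat.left_le_or

theorem pvEdges_eq_or_gt {N : Nat} {pr : List Nat} {k : Int} {m m' : Nat}
    (h : m' ∈ pvEdges N pr k m) : m' = m ∨ m < m' := by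
  rcases List.mem_map.mp h with ⟨sub, hsub, rfl⟩
  rcases eq_or_ne sub 0 with h0 | h0
  · subst h0; exact Or.inl (Nat.or_zero m)
  · refine Or.inr (pv_or_gt_of_ne_zero h0 ?_)
    have h1 : sub &&& pvCanTake N pr m = sub := pvChoices_mem _ k sub hsub
    have h2 : pvCanTake N pr m &&& m = 0 := (pvCanTake_spec N pr m).1
    calc sub &&& m = (sub &&& pvCanTake N pr m) &&& m := by rw [h1]
      _ = sub &&& (pvCanTake N pr m &&& m) := Nat.and_assoc _ _ _
      _ = 0 := by rw [h2, Nat.and_zero]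

theorem pvEdges_lt_two_pow {N : Nat} {pr : List Nat} {k : Int} {m m' : Nat}
    (hm : m < 2 ^ N) (h : m' ∈ pvEdges N pr k m) : m' < 2 ^ N := by
  rcases List.mem_map.mp h with ⟨sub, hsub, rfl⟩
  have h1 : sub &&& pvCanTake N pr m = sub := pvChoices_mem _ k sub hsub
  have h2 : sub ≤ pvCanTake N pr m := h1 ▸ Nat.and_le_right
  exact Nat.or_lt_two_pow hm (lt_of_le_of_lt h2 (pvCanTake_spec N pr m).2)

-- ---------- pvDist facts ----------

theorem pvPMin_mem_iff (N : Nat) (pr : List Nat) (k : Int) (M m x : Nat) :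
    x ∈ (List.range M).filterMap (fun p =>
      if m ∈ pvEdges N pr k p then (pvDist N pr k p).map (· + 1) else none) ↔
    ∃ p < M, m ∈ pvEdges N pr k p ∧ ∃ y, pvDist N pr k p = some y ∧ x = y + 1 := by
  rw [List.mem_filterMap]
  constructor
  · rintro ⟨p, hp, hf⟩
    by_cases hc : m ∈ pvEdges N pr k p
    · rw [if_pos hc] at hf
      rcases Option.map_eq_some_iff.mp hf with ⟨y, hy, hxy⟩
      exact ⟨p, List.mem_range.mp hp, hc, y, hy, hxy.symm⟩
    · rw [if_neg hc] at hf; exact absurd hf (by simp)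
  · rintro ⟨p, hpM, hc, y, hy, rfl⟩
    refine ⟨p, List.mem_range.mpr hpM, ?_⟩
    rw [if_pos hc, hy]; rfl

theorem pvDist_zero (N : Nat) (pr : List Nat) (k : Int) : pvDist N pr k 0 = some 0 := by
  rw [pvDist]; rfl

theorem pvDist_eq_zero {N : Nat} {pr : List Nat} {k : Int} {m : Nat}
    (h : pvDist N pr k m = some 0) : m = 0 := by
  by_contra hm
  rw [pvDist_eq_pvPMin, pvPMin, if_neg hm] at h
  have hmem := (List.min?_eq_some_iff.mp h).1
  rcases (pvPMin_mem_iff N pr k m m 0).mp hmem with ⟨p, _, _, y, _, hx⟩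
  omega

-- one edge adds at most one level
theorem pvDist_step_le {N : Nat} {pr : List Nat} {k : Int} {m m' : Nat} {d : Nat}
    (hm : pvDist N pr k m = some d) (he : m' ∈ pvEdges N pr k m) :
    ∃ e ≤ d + 1, pvDist N pr k m' = some e := by
  rcases pvEdges_eq_or_gt he with rfl | hlt
  · exact ⟨d, by omega, hm⟩
  · have hne : m' ≠ 0 := by omega
    rw [pvDist_eq_pvPMin, pvPMin, if_neg hne]
    have hmem : (d + 1) ∈ (List.range m').filterMap (fun p =>
        if m' ∈ pvEdges N pr k p then (pvDist N pr k p).map (· + 1) else none) :=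
      (pvPMin_mem_iff N pr k m' m' (d + 1)).mpr ⟨m, hlt, he, d, hm, rfl⟩
    rcases hq : ((List.range m').filterMap (fun p =>
        if m' ∈ pvEdges N pr k p then (pvDist N pr k p).map (· + 1) else none)).min? with _ | a
    · rw [List.min?_eq_none_iff] at hq
      rw [hq] at hmem; exact absurd hmem (List.not_mem_nil)
    · exact ⟨a, (List.min?_eq_some_iff.mp hq).2 _ hmem, rfl⟩

-- a positive level is attained through a predecessor one level below
theorem pvDist_attained {N : Nat} {pr : List Nat} {k : Int} {m' : Nat} {d : Nat}
    (h : pvDist N pr k m' = some (d + 1)) :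
    ∃ p, m' ∈ pvEdges N pr k p ∧ pvDist N pr k p = some d := by
  have hne : m' ≠ 0 := by
    intro h0; subst h0
    rw [pvDist_zero] at h
    exact absurd (Option.some.inj h) (by omega)
  rw [pvDist_eq_pvPMin, pvPMin, if_neg hne] at h
  have hmem := (List.min?_eq_some_iff.mp h).1
  rcases (pvPMin_mem_iff N pr k m' m' (d + 1)).mp hmem with ⟨p, _, hc, y, hy, hxy⟩
  have hyd : y = d := by omega
  subst hyd
  exact ⟨p, hc, hy⟩

-- levels are contiguous
theorem pvDist_contig {N : Nat} {pr : List Nat} {k : Int} {m : Nat} {e d : Nat}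
    (h : pvDist N pr k m = some e) (hd : d < e) :
    ∃ m', pvDist N pr k m' = some (d + 1) := by
  induction e generalizing m with
  | zero => omega
  | succ e ih =>
    rcases eq_or_lt_of_le (Nat.lt_succ_iff.mp hd) with rfl | hde
    · exact ⟨m, h⟩
    · rcases pvDist_attained h with ⟨p, _, hp⟩
      exact ih hp hde

-- ---------- the DP port computes pvDist ----------

def pvSomeMin (o : Option Nat) (v : Nat) : Option Nat :=
  some (match o with | none => v | some x => min x v)

theorem pvSomeMin_idem (o : Option Nat) (v : Nat) :
    pvSomeMin (pvSomeMin o v) v = pvSomeMin o v := by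
  cases o <;> simp [pvSomeMin]

theorem pvMin?_append_singleton (l : List Nat) (x : Nat) :
    (l ++ [x]).min? = pvSomeMin l.min? x := by
  cases l with
  | nil => rfl
  | cons a as => simp [List.min?, List.foldl_append, pvSomeMin]

theorem pvPMin_succ_none {N : Nat} {pr : List Nat} {k : Int} {M : Nat}
    (h : pvDist N pr k M = none) (m : Nat) :
    pvPMin N pr k (M + 1) m = pvPMin N pr k M m := by
  unfold pvPMin
  rcases eq_or_ne m 0 with rfl | hm
  · rfl
  · rw [if_neg hm, if_neg hm]
    congr 1
    rw [List.range_succ, List.filterMap_append]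
    have h2 : List.filterMap (fun p =>
        if m ∈ pvEdges N pr k p then (pvDist N pr k p).map (· + 1) else none) [M] = [] := by
      simp [h]
    rw [h2, List.append_nil]

theorem pvPMin_succ_notmem {N : Nat} {pr : List Nat} {k : Int} {M m : Nat}
    (h : m ∉ pvEdges N pr k M) :
    pvPMin N pr k (M + 1) m = pvPMin N pr k M m := by
  unfold pvPMin
  rcases eq_or_ne m 0 with rfl | hm
  · rfl
  · rw [if_neg hm, if_neg hm]
    congr 1
    rw [List.range_succ, List.filterMap_append]
    have h2 : List.filterMap (fun p =>
        if m ∈ pvEdges N pr k p then (pvDist N pr k p).map (· + 1) else none) [M] = [] := by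
      simp [h]
    rw [h2, List.append_nil]

theorem pvPMin_succ_mem {N : Nat} {pr : List Nat} {k : Int} {M m d : Nat}
    (hc : m ∈ pvEdges N pr k M) (hd : pvDist N pr k M = some d) :
    pvPMin N pr k (M + 1) m = pvSomeMin (pvPMin N pr k M m) (d + 1) := by
  unfold pvPMin
  rcases eq_or_ne m 0 with rfl | hm
  · simp [pvSomeMin]
  · rw [if_neg hm, if_neg hm, List.range_succ, List.filterMap_append]
    have h2 : List.filterMap (fun p =>
        if m ∈ pvEdges N pr k p then (pvDist N pr k p).map (· + 1) else none) [M] = [d + 1] := by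
      simp [hc, hd]
    rw [h2, pvMin?_append_singleton]

theorem pvGetD_set (l : List (Option Nat)) (i : Nat) (v : Option Nat) (m : Nat) :
    (l.set i v).getD m none = if i = m ∧ i < l.length then v else l.getD m none := by
  rw [List.getD_eq_getElem?_getD, List.getD_eq_getElem?_getD, List.getElem?_set]
  by_cases h1 : i = m
  · subst h1
    by_cases h2 : i < l.length
    · rw [if_pos rfl, if_pos h2, if_pos ⟨rfl, h2⟩]; rfl
    · rw [if_pos rfl, if_neg h2, if_neg (by tauto)]
      have : l[i]? = none := by
        rw [List.getElem?_eq_none_iff]; omega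
      rw [this]
  · rw [if_neg h1, if_neg (by tauto)]

theorem pvDpRelax_getD (d mask : Nat) (dp : List (Option Nat)) (sub : Nat)
    (h : mask ||| sub < dp.length) :
    ((dpRelax d mask dp sub).length = dp.length) ∧
    ∀ m, (dpRelax d mask dp sub).getD m none =
      if m = mask ||| sub then pvSomeMin (dp.getD m none) (d + 1) else dp.getD m none := by
  rcases hv : dp.getD (mask ||| sub) none with _ | x
  · have hrel : dpRelax d mask dp sub = dp.set (mask ||| sub) (some (d + 1)) := by
      simp only [dpRelax, hv]
    rw [hrel]
    refine ⟨List.length_set, fun m => ?_⟩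
    rw [pvGetD_set]
    by_cases hm : m = mask ||| sub
    · subst hm
      rw [if_pos ⟨rfl, h⟩, if_pos rfl, hv]; rfl
    · rw [if_neg (by tauto), if_neg hm]
  · have hrel : dpRelax d mask dp sub =
        if d + 1 < x then dp.set (mask ||| sub) (some (d + 1)) else dp := by
      simp only [dpRelax, hv]
    rw [hrel]
    by_cases hx : d + 1 < x
    · rw [if_pos hx]
      refine ⟨List.length_set, fun m => ?_⟩
      rw [pvGetD_set]
      by_cases hm : m = mask ||| sub
      · subst hm
        rw [if_pos ⟨rfl, h⟩, if_pos rfl, hv]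
        simp [pvSomeMin, Nat.min_def]; omega
      · rw [if_neg (by tauto), if_neg hm]
    · rw [if_neg hx]
      refine ⟨rfl, fun m => ?_⟩
      by_cases hm : m = mask ||| sub
      · subst hm
        rw [if_pos rfl, hv]
        simp [pvSomeMin, Nat.min_def]; omega
      · rw [if_neg hm]

theorem pvDpFold_getD (d mask : Nat) :
    ∀ (vs : List Nat) (dp : List (Option Nat)), (∀ sub ∈ vs, mask ||| sub < dp.length) →
    ((vs.foldl (dpRelax d mask) dp).length = dp.length) ∧
    ∀ m, (vs.foldl (dpRelax d mask) dp).getD m none =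
      if m ∈ vs.map (mask ||| ·) then pvSomeMin (dp.getD m none) (d + 1)
      else dp.getD m none := by
  intro vs
  induction vs with
  | nil => exact fun dp _ => ⟨rfl, fun m => by simp⟩
  | cons sub t ih =>
    intro dp hlen
    simp only [List.foldl_cons]
    obtain ⟨hL1, hG1⟩ := pvDpRelax_getD d mask dp sub (hlen sub List.mem_cons_self)
    obtain ⟨hL2, hG2⟩ := ih (dpRelax d mask dp sub)
      (fun s hs => hL1 ▸ hlen s (List.mem_cons_of_mem _ hs))
    refine ⟨hL2.trans hL1, fun m => ?_⟩
    rw [hG2 m, hG1 m]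
    have hcons : (m ∈ (sub :: t).map (mask ||| ·)) ↔
        (m = mask ||| sub ∨ m ∈ t.map (mask ||| ·)) := by
      simp [eq_comm]
    by_cases h2 : m ∈ t.map (mask ||| ·) <;> by_cases h1 : m = mask ||| sub
    · rw [if_pos h2, if_pos h1, if_pos (hcons.mpr (Or.inl h1)), pvSomeMin_idem]
    · rw [if_pos h2, if_neg h1, if_pos (hcons.mpr (Or.inr h2))]
    · rw [if_neg h2, if_pos h1, if_pos (hcons.mpr (Or.inl h1))]
    · rw [if_neg h2, if_neg h1, if_neg (fun hc => (hcons.mp hc).elim h1 h2)]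

theorem pvDP_invariant (N : Nat) (pr : List Nat) (k : Int) :
    ∀ M ≤ 2 ^ N,
      ((List.range M).foldl (dpStep N pr k)
          ((List.replicate (2 ^ N) (none : Option Nat)).set 0 (some 0))).length = 2 ^ N ∧
      ∀ m < 2 ^ N,
        ((List.range M).foldl (dpStep N pr k)
            ((List.replicate (2 ^ N) (none : Option Nat)).set 0 (some 0))).getD m none =
          if m < M then pvDist N pr k m else pvPMin N pr k M m := by
  intro M
  induction M with
  | zero =>
    intro _
    refine ⟨by simp, fun m hm => ?_⟩
    rw [if_neg (by omega), List.range_zero, List.foldl_nil, pvGetD_set]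
    rcases eq_or_ne m 0 with rfl | hm0
    · rw [if_pos ⟨rfl, by simp⟩, pvPMin, if_pos rfl]
    · rw [if_neg (by tauto), pvPMin, if_neg hm0]
      simp
  | succ M ihM =>
    intro hM1
    obtain ⟨hLen, hVal⟩ := ihM (by omega)
    have hMlt : M < 2 ^ N := by omega
    rw [List.range_succ, List.foldl_append, List.foldl_cons, List.foldl_nil]
    have hdM : ((List.range M).foldl (dpStep N pr k)
        ((List.replicate (2 ^ N) (none : Option Nat)).set 0 (some 0))).getD M none =
        pvDist N pr k M := by
      rw [hVal M hMlt, if_neg (lt_irrefl M), ← pvDist_eq_pvPMin]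
    cases hv : pvDist N pr k M with
    | none =>
      have hAd : (((List.range M).foldl (dpStep N pr k)
        ((List.replicate (2 ^ N) (none : Option Nat)).set 0 (some 0)))).getD M none = none := by rw [hdM, hv]
      rw [show dpStep N pr k ((List.range M).foldl (dpStep N pr k)
        ((List.replicate (2 ^ N) (none : Option Nat)).set 0 (some 0))) M = ((List.range M).foldl (dpStep N pr k)
        ((List.replicate (2 ^ N) (none : Option Nat)).set 0 (some 0))) from by simp only [dpStep, hAd]]
      refine ⟨hLen, fun m hm => ?_⟩
      rw [hVal m hm]
      by_cases hmM : m < M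
      · rw [if_pos hmM, if_pos (by omega)]
      · rw [if_neg hmM]
        by_cases hmM1 : m < M + 1
        · have hmeq : m = M := by omega
          subst hmeq
          rw [if_pos hmM1, ← pvDist_eq_pvPMin]
        · rw [if_neg hmM1, pvPMin_succ_none hv]
    | some d =>
      have hAd : (((List.range M).foldl (dpStep N pr k)
        ((List.replicate (2 ^ N) (none : Option Nat)).set 0 (some 0)))).getD M none = some d := by rw [hdM, hv]
      rw [show dpStep N pr k ((List.range M).foldl (dpStep N pr k)
        ((List.replicate (2 ^ N) (none : Option Nat)).set 0 (some 0))) M =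
          (pvChoices (pvCanTake N pr M) k).foldl (dpRelax d M) ((List.range M).foldl (dpStep N pr k)
        ((List.replicate (2 ^ N) (none : Option Nat)).set 0 (some 0))) from by
        simp only [dpStep, hAd]]
      have hb : ∀ sub ∈ pvChoices (pvCanTake N pr M) k,
          M ||| sub < ((List.range M).foldl (dpStep N pr k)
            ((List.replicate (2 ^ N) (none : Option Nat)).set 0 (some 0))).length := by
        intro sub hsub
        rw [hLen]
        exact pvEdges_lt_two_pow hMlt (List.mem_map.mpr ⟨sub, hsub, rfl⟩)
      obtain ⟨hL, hG⟩ := pvDpFold_getD d M (pvChoices (pvCanTake N pr M) k) _ hb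
      refine ⟨hL.trans hLen, fun m hm => ?_⟩
      rw [hG m]
      simp only [show List.map (fun x => M ||| x) (pvChoices (pvCanTake N pr M) k) =
        pvEdges N pr k M from rfl]
      by_cases hmE : m ∈ pvEdges N pr k M
      · rw [if_pos hmE, hVal m hm]
        have hge : M ≤ m := pvEdges_ge hmE
        by_cases hmM1 : m < M + 1
        · have hmeq : m = M := by omega
          subst hmeq
          rw [if_neg (lt_irrefl m), if_pos hmM1, ← pvDist_eq_pvPMin, hv]
          simp [pvSomeMin]
        · rw [if_neg (by omega), if_neg hmM1, pvPMin_succ_mem hmE hv]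
      · rw [if_neg hmE, hVal m hm]
        by_cases hmM : m < M
        · rw [if_pos hmM, if_pos (by omega)]
        · rw [if_neg hmM]
          by_cases hmM1 : m < M + 1
          · have hmeq : m = M := by omega
            subst hmeq
            rw [if_pos hmM1, ← pvDist_eq_pvPMin]
          · rw [if_neg hmM1, pvPMin_succ_notmem hmE]

theorem pvAlt_eq_dist (n : Int) (relations : List (Int × Int)) (k : Int) :
    minNumberOfSemesters_alt n relations k =
      match pvDist n.toNat (pvPrereq n relations) k (2 ^ n.toNat - 1) with
      | none => -1
      | some d => (d : Int) := by
  unfold minNumberOfSemesters_alt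
  have h1 : 2 ^ n.toNat - 1 + 1 = 2 ^ n.toNat := Nat.sub_add_cancel Nat.one_le_two_pow
  simp only [h1]
  obtain ⟨_, hVal⟩ := pvDP_invariant n.toNat (pvPrereq n relations) k (2 ^ n.toNat) le_rfl
  rw [hVal (2 ^ n.toNat - 1) (by have := Nat.one_le_two_pow (n := n.toNat); omega),
    if_pos (by have := Nat.one_le_two_pow (n := n.toNat); omega)]

-- ---------- the BFS port computes pvDist ----------

theorem pvSetAdd_of_mem {s : PySem.Set Nat} {x : Nat} (h : x ∈ s) : s.add x = s := by
  unfold PySem.Set.add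
  rw [if_pos ((PySem.Set.contains_iff s x).mpr h)]

theorem pvSetAdd_of_not_mem {s : PySem.Set Nat} {x : Nat} (h : x ∉ s) : s.add x = s ++ [x] := by
  unfold PySem.Set.add
  rw [if_neg (fun hc => h ((PySem.Set.contains_iff s x).mp hc))]

theorem pvSetUpdate_cons (s : PySem.Set Nat) (x : Nat) (l : List Nat) :
    PySem.Set.update s (x :: l) = PySem.Set.update (s.add x) l := rfl

theorem pvSetUpdate_prefix :
    ∀ (l : List Nat) (s : PySem.Set Nat), ∃ t, PySem.Set.update s l = s ++ t := by
  intro l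
  induction l with
  | nil => exact fun s => ⟨[], by simp [PySem.Set.update]⟩
  | cons x t ih =>
    intro s
    rw [pvSetUpdate_cons]
    by_cases hm : x ∈ s
    · rw [pvSetAdd_of_mem hm]; exact ih s
    · rw [pvSetAdd_of_not_mem hm]
      obtain ⟨t', ht⟩ := ih (s ++ [x])
      exact ⟨[x] ++ t', by rw [ht, List.append_assoc]⟩

theorem pvSetUpdate_mem :
    ∀ (l : List Nat) (s : PySem.Set Nat) (x : Nat),
      x ∈ PySem.Set.update s l ↔ x ∈ s ∨ x ∈ l := by
  intro l
  induction l with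
  | nil => simp [PySem.Set.update]
  | cons a t ih =>
    intro s x
    rw [pvSetUpdate_cons, ih]
    rw [PySem.Set.mem_add]
    simp only [List.mem_cons]
    tauto

theorem pvSetUpdate_nodup :
    ∀ (l : List Nat) (s : PySem.Set Nat), s.Nodup → (PySem.Set.update s l).Nodup := by
  intro l
  induction l with
  | nil => exact fun s h => h
  | cons a t ih =>
    intro s h
    rw [pvSetUpdate_cons]
    by_cases hm : a ∈ s
    · rw [pvSetAdd_of_mem hm]; exact ih s h
    · rw [pvSetAdd_of_not_mem hm]
      refine ih _ ?_
      rw [List.nodup_append]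
      refine ⟨h, List.nodup_singleton _, fun x hx b hb hxb => ?_⟩
      simp only [List.mem_singleton] at hb
      subst hxb; subst hb; exact hm hx

theorem pvNews_facts (V : PySem.Set Nat) (l : List Nat) (hnd : V.Nodup) :
    PySem.Set.update V l = V ++ (PySem.Set.update V l).drop V.length ∧
    ((PySem.Set.update V l).drop V.length).Nodup ∧
    (∀ x, x ∈ (PySem.Set.update V l).drop V.length ↔ x ∈ l ∧ x ∉ V) := by
  obtain ⟨t, ht⟩ := pvSetUpdate_prefix l V
  have hdrop : (PySem.Set.update V l).drop V.length = t := by rw [ht, List.drop_left]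
  have hnodup : (V ++ t).Nodup := ht ▸ pvSetUpdate_nodup l V hnd
  rw [List.nodup_append] at hnodup
  refine ⟨by rw [hdrop, ht], hdrop ▸ hnodup.2.1, fun x => ?_⟩
  rw [hdrop]
  constructor
  · intro hx
    have hxu : x ∈ PySem.Set.update V l := by rw [ht]; exact List.mem_append_right _ hx
    have hxV : x ∉ V := fun hv => hnodup.2.2 x hv x hx rfl
    rcases (pvSetUpdate_mem l V x).mp hxu with h | h
    · exact absurd h hxV
    · exact ⟨h, hxV⟩
  · rintro ⟨hl, hV⟩
    have hxu : x ∈ PySem.Set.update V l := (pvSetUpdate_mem l V x).mpr (Or.inr hl)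
    rw [ht] at hxu
    rcases List.mem_append.mp hxu with h | h
    · exact absurd h hV
    · exact h

theorem pvBfsFold_char (mask steps : Nat) :
    ∀ (vs : List Nat) (q0 : List (Nat × Nat)) (V : PySem.Set Nat),
    (vs.foldl (fun (st : List (Nat × Nat) × PySem.Set Nat) sub =>
        let nm := mask ||| sub
        if PySem.Set.contains st.2 nm then st
        else (st.1 ++ [(nm, steps + 1)], PySem.Set.add st.2 nm)) (q0, V)) =
      (q0 ++ ((PySem.Set.update V (vs.map (mask ||| ·))).drop V.length).map
          (fun x => (x, steps + 1)),
        PySem.Set.update V (vs.map (mask ||| ·))) := by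
  intro vs
  induction vs with
  | nil => intro q0 V; simp [PySem.Set.update, List.drop_length]
  | cons sub t ih =>
    intro q0 V
    simp only [List.foldl_cons, List.map_cons, pvSetUpdate_cons]
    by_cases hm : (mask ||| sub) ∈ V
    · rw [if_pos (by simpa using (PySem.Set.contains_iff V (mask ||| sub)).mpr hm)]
      rw [pvSetAdd_of_mem hm]
      exact ih q0 V
    · rw [if_neg (by simpa using fun hc => hm ((PySem.Set.contains_iff V (mask ||| sub)).mp hc))]
      rw [pvSetAdd_of_not_mem hm]
      rw [ih (q0 ++ [(mask ||| sub, steps + 1)]) (V ++ [mask ||| sub])]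
      obtain ⟨tail, htail⟩ := pvSetUpdate_prefix (t.map (mask ||| ·)) (V ++ [mask ||| sub])
      rw [htail]
      have h1 : ((V ++ [mask ||| sub]) ++ tail).drop (V ++ [mask ||| sub]).length = tail :=
        List.drop_left
      have h2 : ((V ++ [mask ||| sub]) ++ tail).drop V.length = (mask ||| sub) :: tail := by
        rw [List.append_assoc]
        have : [mask ||| sub] ++ tail = (mask ||| sub) :: tail := rfl
        rw [this, List.drop_left]
      rw [h1, h2]
      simp [List.append_assoc]


structure pvBfsInv (N : Nat) (pr : List Nat) (k : Int) (q : List (Nat × Nat))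
    (V : PySem.Set Nat) (d : Nat) (q1 q2 : List (Nat × Nat)) : Prop where
  split : q = q1 ++ q2
  q1d : ∀ p ∈ q1, p.2 = d ∧ pvDist N pr k p.1 = some d
  q2d : ∀ p ∈ q2, p.2 = d + 1 ∧ pvDist N pr k p.1 = some (d + 1)
  qnodup : (q.map Prod.fst).Nodup
  q2complete : ∀ m, pvDist N pr k m = some (d + 1) →
    ((∃ p, m ∈ pvEdges N pr k p ∧ pvDist N pr k p = some d ∧ p ∉ q1.map Prod.fst) ↔
      m ∈ q2.map Prod.fst)
  vchar : ∀ m, m ∈ V ↔ ((∃ e ≤ d, pvDist N pr k m = some e) ∨ m ∈ q2.map Prod.fst)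
  vnodup : V.Nodup
  vbound : ∀ m ∈ V, m < 2 ^ N
  qbound : ∀ p ∈ q, p.1 < 2 ^ N
  fnp : ∀ e, pvDist N pr k (2 ^ N - 1) = some e → d ≤ e
  fq1 : pvDist N pr k (2 ^ N - 1) = some d → (2 ^ N - 1) ∈ q1.map Prod.fst

theorem pvLen_le_two_pow {N : Nat} {V : List Nat} (hnd : V.Nodup)
    (hb : ∀ m ∈ V, m < 2 ^ N) : V.length ≤ 2 ^ N := by
  have h1 : V.toFinset.card = V.length := List.toFinset_card_of_nodup hnd
  have h2 : V.toFinset ⊆ Finset.range (2 ^ N) := by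
    intro x hx
    rw [Finset.mem_range]
    exact hb x (List.mem_toFinset.mp hx)
  have h3 := Finset.card_le_card h2
  rw [h1, Finset.card_range] at h3
  exact h3

theorem pvBfsInv_shift {N : Nat} {pr : List Nat} {k : Int} {q : List (Nat × Nat)}
    {V : PySem.Set Nat} {d : Nat} {q2 : List (Nat × Nat)}
    (inv : pvBfsInv N pr k q V d [] q2) : pvBfsInv N pr k q V (d + 1) q2 [] := by
  have hq2all : ∀ m, pvDist N pr k m = some (d + 1) → m ∈ q2.map Prod.fst := by
    intro m hm
    rcases pvDist_attained hm with ⟨p, hep, hdp⟩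
    exact (inv.q2complete m hm).mp ⟨p, hep, hdp, by simp⟩
  refine ⟨?_, ?_, ?_, ?_, ?_, ?_, inv.vnodup, inv.vbound, inv.qbound, ?_, ?_⟩
  · simpa using inv.split
  · exact fun p hp => inv.q2d p hp
  · exact fun p hp => absurd hp List.not_mem_nil
  · exact inv.qnodup
  · intro m hm
    constructor
    · rintro ⟨p, hep, hdp, hnp⟩
      exact absurd (hq2all p hdp) hnp
    · intro h; exact absurd h (by simp)
  · intro m
    rw [inv.vchar m]
    constructor
    · rintro (⟨e, he, hm⟩ | hm)
      · exact Or.inl ⟨e, by omega, hm⟩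
      · rcases List.mem_map.mp hm with ⟨p, hp, rfl⟩
        exact Or.inl ⟨d + 1, le_rfl, (inv.q2d p hp).2⟩
    · rintro (⟨e, he, hm⟩ | hm)
      · rcases Nat.lt_succ_iff_lt_or_eq.mp (Nat.lt_succ_of_le he) with h | h
        · exact Or.inl ⟨e, by omega, hm⟩
        · subst h; exact Or.inr (hq2all m hm)
      · exact absurd hm (by simp)
  · intro e hF
    have h1 := inv.fnp e hF
    rcases eq_or_lt_of_le h1 with rfl | h
    · exact absurd (inv.fq1 hF) (by simp)
    · omega
  · intro hF
    exact hq2all _ hF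

theorem pvBfs_correct (N : Nat) (pr : List Nat) (k : Int) :
    ∀ (fuel : Nat) (q : List (Nat × Nat)) (V : PySem.Set Nat) (d : Nat)
      (q1 q2 : List (Nat × Nat)), pvBfsInv N pr k q V d q1 q2 →
      q.length + 2 * (2 ^ N - V.length) < fuel →
      bfsLoopA N pr k fuel q V =
        match pvDist N pr k (2 ^ N - 1) with
        | none => -1
        | some e => (e : Int) := by
  intro fuel
  induction fuel using Nat.strong_induction_on with
  | _ fuel IH =>
    intro q V d q1 q2 inv hfuel
    cases fuel with
    | zero => omega
    | succ fuel =>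
      cases q with
      | nil =>
        have hq12 := inv.split.symm
        rw [List.append_eq_nil_iff] at hq12
        obtain ⟨hq1, hq2⟩ := hq12
        subst hq1; subst hq2
        have hnone : pvDist N pr k (2 ^ N - 1) = none := by
          rcases hFd : pvDist N pr k (2 ^ N - 1) with _ | e
          · rfl
          · exfalso
            have h1 : d ≤ e := inv.fnp e hFd
            have h2 : e ≠ d := by
              intro h; subst h
              exact absurd (inv.fq1 hFd) (by simp)
            obtain ⟨m', hm'⟩ := pvDist_contig hFd (show d < e by omega)
            obtain ⟨p, hep, hdp⟩ := pvDist_attained hm'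
            have hmem := (inv.q2complete m' hm').mp ⟨p, hep, hdp, by simp⟩
            simp at hmem
        rw [hnone]
        rfl
      | cons hd rest =>
        obtain ⟨mask, steps⟩ := hd
        have H : ∃ d' q1' q2', pvBfsInv N pr k ((mask, steps) :: rest) V d' q1' q2' ∧
            q1' ≠ [] := by
          cases q1 with
          | cons a t => exact ⟨d, a :: t, q2, inv, by simp⟩
          | nil =>
            refine ⟨d + 1, q2, [], pvBfsInv_shift inv, ?_⟩
            have hsp := inv.split
            simp only [List.nil_append] at hsp
            rw [← hsp]
            simp
        clear inv
        obtain ⟨d, q1, q2, inv, hq1ne⟩ := H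
        obtain ⟨q1t, rfl, hrest⟩ : ∃ q1t, q1 = (mask, steps) :: q1t ∧ rest = q1t ++ q2 := by
          cases q1 with
          | nil => exact absurd rfl hq1ne
          | cons a t =>
            have hsp := inv.split
            rw [List.cons_append] at hsp
            injection hsp with h1 h2
            exact ⟨t, by rw [h1], h2⟩
        subst hrest
        have hhead := inv.q1d (mask, steps) List.mem_cons_self
        have hdmask : pvDist N pr k mask = some d := hhead.2
        have hsteps : steps = d := hhead.1
        subst hsteps
        rw [bfsLoopA]
        by_cases hF : mask = 2 ^ N - 1
        · rw [if_pos hF]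
          rw [hF] at hdmask
          rw [hdmask]
        · rw [if_neg hF]
          rw [pvBfsFold_char mask steps (pvChoices (pvCanTake N pr mask) k) (q1t ++ q2) V]
          simp only [show (pvChoices (pvCanTake N pr mask) k).map (mask ||| ·) =
            pvEdges N pr k mask from rfl]
          have hmask2N : mask < 2 ^ N := inv.qbound (mask, steps) List.mem_cons_self
          obtain ⟨hVfact, hnewnd, hnewmem⟩ := pvNews_facts V (pvEdges N pr k mask) inv.vnodup
          have hnewdist : ∀ x ∈ (PySem.Set.update V (pvEdges N pr k mask)).drop V.length,
              pvDist N pr k x = some (steps + 1) := by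
            intro x hx
            obtain ⟨hxe, hxV⟩ := (hnewmem x).mp hx
            rcases pvDist_step_le hdmask hxe with ⟨e, he, hde⟩
            rcases Nat.lt_succ_iff_lt_or_eq.mp (Nat.lt_succ_of_le he) with hlt | heq
            · exact absurd ((inv.vchar x).mpr (Or.inl ⟨e, by omega, hde⟩)) hxV
            · rw [heq] at hde; exact hde
          have holdnodup := inv.qnodup
          rw [List.map_cons, List.nodup_cons] at holdnodup
          have hq2V : ∀ x ∈ q2.map Prod.fst, x ∈ V := fun x hx =>
            (inv.vchar x).mpr (Or.inr hx)
          have hq1tV : ∀ x ∈ q1t.map Prod.fst, x ∈ V := by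
            intro x hx
            rcases List.mem_map.mp hx with ⟨p, hp, rfl⟩
            exact (inv.vchar p.1).mpr
              (Or.inl ⟨steps, le_rfl, (inv.q1d p (List.mem_cons_of_mem _ hp)).2⟩)
          have hmapnew : ∀ (ll : List Nat),
              (ll.map (fun x => (x, steps + 1))).map Prod.fst = ll := by
            intro ll; simp [Function.comp_def]
          have inv' : pvBfsInv N pr k
              ((q1t ++ q2) ++
                ((PySem.Set.update V (pvEdges N pr k mask)).drop V.length).map
                  (fun x => (x, steps + 1)))
              (PySem.Set.update V (pvEdges N pr k mask)) steps q1t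
              (q2 ++ ((PySem.Set.update V (pvEdges N pr k mask)).drop V.length).map
                  (fun x => (x, steps + 1))) := by
            refine ⟨?_, ?_, ?_, ?_, ?_, ?_, ?_, ?_, ?_, ?_, ?_⟩
            · rw [List.append_assoc]
            · exact fun p hp => inv.q1d p (List.mem_cons_of_mem _ hp)
            · intro p hp
              rcases List.mem_append.mp hp with h | h
              · exact inv.q2d p h
              · rcases List.mem_map.mp h with ⟨x, hx, rfl⟩
                exact ⟨rfl, hnewdist x hx⟩
            · rw [List.map_append, hmapnew, List.nodup_append]
              refine ⟨holdnodup.2, hnewnd, ?_⟩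
              intro a ha b hb hab
              subst hab
              have haV : a ∈ V := by
                rw [List.map_append] at ha
                rcases List.mem_append.mp ha with h | h
                · exact hq1tV a h
                · exact hq2V a h
              exact ((hnewmem a).mp hb).2 haV
            · intro m hm
              rw [List.map_append, hmapnew, List.mem_append]
              constructor
              · rintro ⟨p, hep, hdp, hnp⟩
                by_cases hpm : p = mask
                · subst hpm
                  by_cases hmV : m ∈ V
                  · rcases (inv.vchar m).mp hmV with ⟨e, he, hme⟩ | h
                    · rw [hm] at hme
                      exact absurd (Option.some.inj hme) (by omega)
                    · exact Or.inl h
                  · exact Or.inr ((hnewmem m).mpr ⟨hep, hmV⟩)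
                · have hpq1 : p ∉ (((mask, steps) :: q1t).map Prod.fst) := by
                    simp only [List.map_cons, List.mem_cons]
                    rintro (h | h)
                    · exact hpm h
                    · exact hnp h
                  exact Or.inl ((inv.q2complete m hm).mp ⟨p, hep, hdp, hpq1⟩)
              · rintro (h | h)
                · obtain ⟨p, hep, hdp, hnp⟩ := (inv.q2complete m hm).mpr h
                  refine ⟨p, hep, hdp, fun hc => hnp ?_⟩
                  simp only [List.map_cons, List.mem_cons]
                  exact Or.inr hc
                · obtain ⟨hme, hmV⟩ := (hnewmem m).mp h
                  refine ⟨mask, hme, hdmask, fun hc => holdnodup.1 ?_⟩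
                  rw [List.map_append]
                  exact List.mem_append_left _ hc
            · intro m
              rw [pvSetUpdate_mem, List.map_append, hmapnew, List.mem_append]
              constructor
              · rintro (h | h)
                · rcases (inv.vchar m).mp h with h2 | h2
                  · exact Or.inl h2
                  · exact Or.inr (Or.inl h2)
                · by_cases hmV : m ∈ V
                  · rcases (inv.vchar m).mp hmV with h2 | h2
                    · exact Or.inl h2
                    · exact Or.inr (Or.inl h2)
                  · exact Or.inr (Or.inr ((hnewmem m).mpr ⟨h, hmV⟩))
              · rintro (h | h | h)
                · exact Or.inl ((inv.vchar m).mpr (Or.inl h))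
                · exact Or.inl ((inv.vchar m).mpr (Or.inr h))
                · exact Or.inr ((hnewmem m).mp h).1
            · exact pvSetUpdate_nodup _ _ inv.vnodup
            · intro m hm
              rcases (pvSetUpdate_mem _ _ m).mp hm with h | h
              · exact inv.vbound m h
              · exact pvEdges_lt_two_pow hmask2N h
            · intro p hp
              rcases List.mem_append.mp hp with h | h
              · exact inv.qbound p (List.mem_cons_of_mem _ h)
              · rcases List.mem_map.mp h with ⟨x, hx, rfl⟩
                exact pvEdges_lt_two_pow hmask2N ((hnewmem x).mp hx).1
            · exact inv.fnp
            · intro hdF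
              have hmem := inv.fq1 hdF
              simp only [List.map_cons, List.mem_cons] at hmem
              rcases hmem with h | h
              · exact absurd h.symm hF
              · exact h
          refine IH fuel (Nat.lt_succ_self fuel) _ _ steps q1t _ inv' ?_
          have hlen_eq : (PySem.Set.update V (pvEdges N pr k mask)).length =
              V.length + ((PySem.Set.update V (pvEdges N pr k mask)).drop V.length).length := by
            conv_lhs => rw [hVfact]
            rw [List.length_append]
          have hVle : (PySem.Set.update V (pvEdges N pr k mask)).length ≤ 2 ^ N :=
            pvLen_le_two_pow (pvSetUpdate_nodup _ _ inv.vnodup)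
              (fun m hm => by
                rcases (pvSetUpdate_mem _ _ m).mp hm with h | h
                · exact inv.vbound m h
                · exact pvEdges_lt_two_pow hmask2N h)
          simp only [List.length_append, List.length_map, List.length_cons] at hfuel ⊢
          omega

theorem pvA_eq_dist (n : Int) (relations : List (Int × Int)) (k : Int) :
    minNumberOfSemesters n relations k =
      match pvDist n.toNat (pvPrereq n relations) k (2 ^ n.toNat - 1) with
      | none => -1
      | some d => (d : Int) := by
  unfold minNumberOfSemesters
  have hV : PySem.Set.ofList [0] = ([0] : List Nat) := rfl
  rw [hV]
  refine pvBfs_correct n.toNat (pvPrereq n relations) k _ _ _ 0 [(0, 0)] [] ?_ ?_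
  · refine ⟨rfl, ?_, ?_, ?_, ?_, ?_, ?_, ?_, ?_, ?_, ?_⟩
    · intro p hp
      rw [List.mem_singleton] at hp
      subst hp
      exact ⟨rfl, pvDist_zero _ _ _⟩
    · intro p hp; exact absurd hp List.not_mem_nil
    · simp
    · intro m hm
      constructor
      · rintro ⟨p, hep, hdp, hnp⟩
        have hp0 : p = 0 := pvDist_eq_zero hdp
        subst hp0
        exact absurd (by simp) hnp
      · intro h; exact absurd h (by simp)
    · intro m
      simp only [List.map_nil, List.not_mem_nil, or_false]
      constructor
      · intro h
        rw [List.mem_singleton] at h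
        subst h
        exact ⟨0, le_rfl, pvDist_zero _ _ _⟩
      · rintro ⟨e, he, hm⟩
        have he0 : e = 0 := by omega
        subst he0
        have hm0 := pvDist_eq_zero hm
        simp [hm0]
    · simp
    · intro m hm
      rw [List.mem_singleton] at hm
      subst hm
      exact Nat.two_pow_pos _
    · intro p hp
      rw [List.mem_singleton] at hp
      subst hp
      exact Nat.two_pow_pos _
    · intro e _; exact Nat.zero_le e
    · intro hF
      have h0 : (2 ^ n.toNat - 1) = 0 := pvDist_eq_zero hF
      simp [h0]
  · have h1 : (2 : Nat) ^ (n.toNat + 1) = 2 * 2 ^ n.toNat := by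
      rw [Nat.pow_succ, Nat.mul_comm]
    have h2 : (1 : Nat) ≤ 2 ^ n.toNat := Nat.one_le_two_pow
    simp only [List.length_cons, List.length_nil]
    omega

-- ===== VERDICT (by name: the statement is the Claim_ definition above) =====
theorem minNumberOfSemesters_spec : Claim_equal_minNumberOfSemesters := by
  intro n relations k _ _
  unfold Spec_minNumberOfSemesters
  rw [pvA_eq_dist, pvAlt_eq_dist]
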